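-- pv_equiv track=rewrite | github.com/JayVicky007/Python_Class | Assessments/assessment_2.py | largest_divisible
-- ===== SOURCE A (Python) =====
-- def largest_divisible(lst, n):
--     myList = []
--     for i in lst:
--         if i % n == 0:
--             myList.append(i)
--     if len(myList) == 0:
--         return None
--     max_num = max(myList)
--     return max_num
-- ===== SOURCE B (Python) =====
-- def largest_divisible(lst, n):
--     ordered = sorted(lst, reverse=True)
--     for i in ordered:
--         if i % n == 0:
--             return i
--     return None
-- ===== Notes on version B (the rewrite author's own statement) =====
-- stated objective: alternative
-- what changed: B sorts a copy of the list in descending order and returns the first element divisible by n, instead of A's filter-into-a-list-then-max pass.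
-- outside the precondition, e.g. on largest_divisible([], 0): A returns None, B returns None
import Mathlib
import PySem

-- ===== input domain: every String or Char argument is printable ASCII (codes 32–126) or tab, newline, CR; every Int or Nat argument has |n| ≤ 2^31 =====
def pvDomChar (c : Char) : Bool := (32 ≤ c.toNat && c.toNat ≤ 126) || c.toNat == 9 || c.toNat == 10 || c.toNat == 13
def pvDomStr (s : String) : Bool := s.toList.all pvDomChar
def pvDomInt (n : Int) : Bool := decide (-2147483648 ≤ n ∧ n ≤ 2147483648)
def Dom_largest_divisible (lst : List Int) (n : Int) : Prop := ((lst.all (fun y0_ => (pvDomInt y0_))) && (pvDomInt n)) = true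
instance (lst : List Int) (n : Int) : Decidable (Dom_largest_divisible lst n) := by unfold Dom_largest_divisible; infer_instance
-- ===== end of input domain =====

-- B sorts a copy of the list in descending order and returns the first element divisible by n,
-- instead of A's filter-into-a-list-then-max pass (alternative decomposition, not faster).

-- ===== PORT A =====
def largest_divisible (lst : List Int) (n : Int) : Option Int :=
  let myList := lst.foldl (fun acc i => if PySem.Int.mod i n == 0 then acc ++ [i] else acc) []
  if myList.length = 0 then none
  else PySem.List.max? myList (fun x => x)

-- ===== PORT B =====
def largest_divisible_alt (lst : List Int) (n : Int) : Option Int :=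
  let ordered := PySem.List.sorted lst (fun x => x) true
  ordered.find? (fun i => PySem.Int.mod i n == 0)

-- ===== PRECONDITION & SPEC =====
-- Pre_ excludes n = 0, on which Python's '%' raises ZeroDivisionError in both A and B whenever the
-- list is nonempty (on the degenerate ([], 0) both return None, so nothing is lost there).
def Pre_largest_divisible (lst : List Int) (n : Int) : Prop := n ≠ 0
instance (lst : List Int) (n : Int) : Decidable (Pre_largest_divisible lst n) := by unfold Pre_largest_divisible; infer_instance
def pvWitness_largest_divisible : List Int × Int := ([3, 7, 6], 3)

def Spec_largest_divisible (lst : List Int) (n : Int) (out : Option Int) : Prop := out = largest_divisible_alt lst n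
instance (lst : List Int) (n : Int) (out : Option Int) : Decidable (Spec_largest_divisible lst n out) := by unfold Spec_largest_divisible; infer_instance

-- ===== CLAIM (what is proved, stated in full; the proofs are below) =====
def Claim_equal_largest_divisible : Prop := ∀ (lst : List Int) (n : Int), Dom_largest_divisible lst n → Pre_largest_divisible lst n → Spec_largest_divisible lst n (largest_divisible lst n)

-- ===== LEMMAS AND PROOFS =====

-- A's append-filter loop builds the filtered list.
theorem foldl_append_if_eq_filter (p : Int → Bool) (lst : List Int) (acc : List Int) :
    lst.foldl (fun acc i => if p i then acc ++ [i] else acc) acc = acc ++ lst.filter p := by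
  induction lst generalizing acc with
  | nil => simp
  | cons x t ih =>
    simp only [List.foldl_cons, List.filter_cons]
    by_cases hx : p x = true <;> simp [hx, ih]

-- In a descending (Pairwise ≥) list, the first element satisfying p bounds every element satisfying p.
theorem find?_pairwise_max (p : Int → Bool) (s : List Int)
    (hs : s.Pairwise (fun a b => b ≤ a)) (b : Int) (hb : s.find? p = some b) :
    ∀ y ∈ s, p y = true → y ≤ b := by
  induction s with
  | nil => simp at hb
  | cons x t ih =>
    rcases List.pairwise_cons.mp hs with ⟨hx, ht⟩
    by_cases hpx : p x = true
    · rw [List.find?_cons_of_pos hpx] at hb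
      cases hb
      intro y hy _
      rcases List.mem_cons.mp hy with rfl | hy
      · exact le_refl _
      · exact hx y hy
    · rw [List.find?_cons_of_neg (by simpa using hpx)] at hb
      intro y hy hpy
      rcases List.mem_cons.mp hy with rfl | hy
      · exact absurd hpy hpx
      · exact ih ht hb y hy hpy

theorem largest_divisible_eq (lst : List Int) (n : Int) :
    largest_divisible lst n = largest_divisible_alt lst n := by
  unfold largest_divisible largest_divisible_alt
  set p : Int → Bool := fun i => PySem.Int.mod i n == 0 with hp
  rw [foldl_append_if_eq_filter p lst []]
  simp only [List.nil_append]
  set s := PySem.List.sorted lst (fun x => x) true with hs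
  have hperm : s.Perm lst := PySem.List.sorted_perm lst (fun x => x) true
  have hpair : s.Pairwise (fun a b => (fun x => x) b ≤ (fun x => x) a) :=
    PySem.List.sorted_pairwise_rev lst (fun x => x)
  by_cases hf : lst.filter p = []
  · rw [hf]
    simp only [List.length_nil, if_true]
    symm
    rw [List.find?_eq_none]
    intro y hy
    have : y ∈ lst := hperm.mem_iff.mp hy
    have := List.filter_eq_nil_iff.mp hf y this
    simpa using this
  · rw [if_neg (by simpa using hf)]
    -- A's side: max of the filtered list
    obtain ⟨a, ha⟩ : ∃ a, PySem.List.max? (lst.filter p) (fun x => x) = some a := by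
      cases h : PySem.List.max? (lst.filter p) (fun x => x) with
      | none => exact absurd ((PySem.List.max?_eq_none_iff _ _).mp h) hf
      | some a => exact ⟨a, rfl⟩
    have hamem : a ∈ lst.filter p := PySem.List.max?_mem ha
    have hamax : ∀ y ∈ lst.filter p, y ≤ a := by
      intro y hy; exact PySem.List.max?_isMax ha y hy
    -- B's side: first divisible element of the descending sort
    obtain ⟨b, hb⟩ : ∃ b, s.find? p = some b := by
      cases h : s.find? p with
      | none =>
        exfalso
        have hmem : a ∈ s := hperm.mem_iff.mpr (List.mem_of_mem_filter hamem)
        have hpa : p a = true := List.of_mem_filter hamem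
        have := List.find?_eq_none.mp h a hmem
        exact this hpa
      | some b => exact ⟨b, rfl⟩
    rw [ha, hb]
    have hbmem : b ∈ s := List.mem_of_find?_eq_some hb
    have hpb : p b = true := List.find?_some hb
    have hbf : b ∈ lst.filter p := List.mem_filter.mpr ⟨hperm.mem_iff.mp hbmem, hpb⟩
    have h1 : b ≤ a := hamax b hbf
    have h2 : a ≤ b :=
      find?_pairwise_max p s hpair b hb a (hperm.mem_iff.mpr (List.mem_of_mem_filter hamem))
        (List.of_mem_filter hamem)
    exact congrArg some (le_antisymm h2 h1)

-- ===== VERDICT (by name: the statement is the Claim_ definition above) =====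
theorem largest_divisible_spec : Claim_equal_largest_divisible := by
  intro lst n _ _
  exact largest_divisible_eq lst n
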